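-- pv_equiv track=rewrite | github.com/yuyongkim/probably-alpha | packages/adapters/ky_adapters/kis/websocket.py | _parse_pipe_frame
-- ===== SOURCE A (Python) =====
-- from typing import Any, AsyncIterator, Optional
--
-- def _parse_pipe_frame(raw: str, field_schema: list[str]) -> list[dict[str, Any]]:
--     """Split ``payload`` fields into ``count`` records of ``len(schema)`` each.
--
--     KIS frame format: ``encrypt|tr_id|count|v1^v2^...``
--     """
--     parts = raw.split("|", 3)
--     if len(parts) < 4:
--         return []
--     try:
--         count = int(parts[2])
--     except ValueError:
--         count = 1
--     tokens = parts[3].split("^")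
--     width = len(field_schema)
--     out: list[dict[str, Any]] = []
--     for i in range(count):
--         chunk = tokens[i * width : (i + 1) * width]
--         if not chunk:
--             continue
--         rec = {field_schema[j] if j < width else f"f{j}": chunk[j] for j in range(len(chunk))}
--         out.append(rec)
--     return out
-- ===== SOURCE B (Python) =====
-- def _parse_pipe_frame(raw: str, field_schema: list[str]) -> list[dict[str, str]]:
--     parts = raw.split("|", 3)
--     if len(parts) < 4:
--         return []
--     try:
--         count = int(parts[2])
--     except ValueError:
--         count = 1
--     width = len(field_schema)
--     if width == 0 or count <= 0:
--         return []
--     prefix = parts[3].split("^")[: count * width]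
--     out = []
--     while prefix:
--         out.append(dict(zip(field_schema, prefix[:width])))
--         prefix = prefix[width:]
--     return out
-- ===== Notes on version B (the rewrite author's own statement) =====
-- stated objective: alternative
-- what changed: B replaces A's loop over record indices 0..count-1 (with per-index slice arithmetic and skip-empty-chunk continues) by an up-front guard (width==0 or count<=0 gives []), a single truncation of the token list to count*width tokens, and a structural while-loop that peels one width-sized chunk off the front per record via dict(zip(field_schema, chunk)).
import Mathlib
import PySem

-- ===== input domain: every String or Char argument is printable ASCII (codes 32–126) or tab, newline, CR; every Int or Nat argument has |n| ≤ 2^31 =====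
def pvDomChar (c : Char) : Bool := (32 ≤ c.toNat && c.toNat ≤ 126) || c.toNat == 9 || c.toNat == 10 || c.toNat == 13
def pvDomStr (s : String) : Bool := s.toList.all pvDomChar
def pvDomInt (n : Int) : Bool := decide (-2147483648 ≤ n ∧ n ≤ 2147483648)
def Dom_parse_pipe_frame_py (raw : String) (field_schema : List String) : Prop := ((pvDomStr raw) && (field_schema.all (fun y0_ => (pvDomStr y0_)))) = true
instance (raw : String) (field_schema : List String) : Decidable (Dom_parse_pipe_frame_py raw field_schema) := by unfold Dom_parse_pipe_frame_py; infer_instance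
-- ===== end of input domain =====

-- B replaces A's count-indexed loop (which re-slices the token list per index and skips empty
-- chunks) by an up-front guard, one truncation of the token list, and a structural recursion
-- peeling one width-sized chunk per record; the return values are proved equal everywhere.

-- ===== PORT A =====

def parse_pipe_frame_py (raw : String) (field_schema : List String) : List (List (String × String)) :=
  let parts := (PySem.Str.splitMax? raw "|" 3).getD []
  if parts.length < 4 then []
  else
    let count : Int := (PySem.Int.ofStr? (PySem.List.pyGetD parts 2 "")).getD 1
    let tokens := (PySem.Str.split? (PySem.List.pyGetD parts 3 "") "^").getD []
    let width : Int := (field_schema.length : Int)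
    (PySem.List.pyRange 0 count 1).foldl
      (fun out i =>
        let chunk := PySem.List.slice tokens (some (i * width)) (some ((i + 1) * width))
        if chunk = [] then out
        else
          out ++ [((PySem.List.pyRange 0 (PySem.List.len chunk) 1).foldl
            (fun d j => d.insert
              (if j < width then PySem.List.pyGetD field_schema j "" else "f" ++ PySem.Int.toStr j)
              (PySem.List.pyGetD chunk j "")) PySem.Dict.empty).items]) []

-- ===== PORT B =====
-- the while loop of Source B: peel prefix[:width] off the front of the (pre-truncated) token list
-- until it is empty; the '0, _' arm is only a termination guard (the caller ensures width ≠ 0).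
-- (slices pfx[:width] / pfx[width:] / tokens[:count*width] are ported as take/drop, exact by
-- PySem.List.slice_to_natCast / slice_from_natCast / slice_to.)
def pvChunkB (field_schema : List String) (width : Nat) (pfx : List String) : List (List (String × String)) :=
  match width, pfx with
  | _, [] => []
  | 0, _ => []
  | w + 1, p :: ps =>
      (PySem.Dict.ofList (field_schema.zip ((p :: ps).take (w + 1)))).items
        :: pvChunkB field_schema (w + 1) (ps.drop w)
termination_by pfx.length
decreasing_by simp

def parse_pipe_frame_py_alt (raw : String) (field_schema : List String) : List (List (String × String)) :=
  let parts := (PySem.Str.splitMax? raw "|" 3).getD []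
  if parts.length < 4 then []
  else
    let count : Int := (PySem.Int.ofStr? (PySem.List.pyGetD parts 2 "")).getD 1
    let width := field_schema.length
    if width = 0 ∨ count ≤ 0 then []
    else
      let pfx := ((PySem.Str.split? (PySem.List.pyGetD parts 3 "") "^").getD []).take (count * width).toNat
      pvChunkB field_schema width pfx

-- ===== PRECONDITION & SPEC =====
def Spec_parse_pipe_frame_py (raw : String) (field_schema : List String) (out : List (List (String × String))) : Prop := out = parse_pipe_frame_py_alt raw field_schema
instance (raw : String) (field_schema : List String) (out : List (List (String × String))) : Decidable (Spec_parse_pipe_frame_py raw field_schema out) := by unfold Spec_parse_pipe_frame_py; infer_instance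

-- ===== CLAIM (what is proved, stated in full; the proofs are below) =====
def Claim_equal_parse_pipe_frame_py : Prop := ∀ (raw : String) (field_schema : List String), Dom_parse_pipe_frame_py raw field_schema → Spec_parse_pipe_frame_py raw field_schema (parse_pipe_frame_py raw field_schema)

-- ===== LEMMAS AND PROOFS =====

-- A's Int-indexed fold over pyRange 0 n 1, rewritten slice-by-slice into a Nat-indexed fold
theorem pv_normalize (schema tokens : List String) (n : Nat) (acc : List (List (String × String))) :
    (PySem.List.pyRange 0 (n : Int) 1).foldl
      (fun out i =>
        let chunk := PySem.List.slice tokens (some (i * (schema.length : Int))) (some ((i + 1) * (schema.length : Int)))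
        if chunk = [] then out
        else
          out ++ [((PySem.List.pyRange 0 (PySem.List.len chunk) 1).foldl
            (fun d j => d.insert
              (if j < (schema.length : Int) then PySem.List.pyGetD schema j "" else "f" ++ PySem.Int.toStr j)
              (PySem.List.pyGetD chunk j "")) PySem.Dict.empty).items]) acc
    = (List.range n).foldl
      (fun out k =>
        let chunk := (tokens.drop (k * schema.length)).take schema.length
        if chunk = [] then out
        else
          out ++ [((PySem.List.pyRange 0 (PySem.List.len chunk) 1).foldl
            (fun d j => d.insert
              (if j < (schema.length : Int) then PySem.List.pyGetD schema j "" else "f" ++ PySem.Int.toStr j)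
              (PySem.List.pyGetD chunk j "")) PySem.Dict.empty).items]) acc := by
  rw [PySem.List.pyRange_one]
  simp only [sub_zero, Int.toNat_natCast, List.foldl_map, zero_add]
  apply PySem.List.foldl_congr_mem
  intro out k _
  have h1 : (k : Int) * (schema.length : Int) = ((k * schema.length : Nat) : Int) := by push_cast; ring
  have h2 : ((k : Int) + 1) * (schema.length : Int) = (((k + 1) * schema.length : Nat) : Int) := by push_cast; ring
  rw [h1, h2, PySem.List.slice_natCast]
  have h3 : (k + 1) * schema.length - k * schema.length = schema.length := by ring_nf; omega
  rw [h3]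

-- folding insertions indexed over range(len(vs)) builds the dict of the zipped pairs
theorem pv_zipfold (vs ks : List String) (d : PySem.Dict String String) (h : vs.length ≤ ks.length) :
    (List.range vs.length).foldl (fun d k => d.insert (ks.getD k "") (vs.getD k "")) d
    = (ks.zip vs).foldl (fun d p => d.insert p.1 p.2) d := by
  induction vs generalizing ks d with
  | nil => simp
  | cons v vs ih =>
    cases ks with
    | nil => simp at h
    | cons k ks =>
      simp only [List.length_cons, List.range_succ_eq_map, List.foldl_cons, List.foldl_map,
        List.getD_cons_zero, List.getD_cons_succ, List.zip_cons_cons]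
      exact ih ks (d.insert k v) (by simpa using h)

theorem pv_rec_eq (schema chunk : List String) (h : chunk.length ≤ schema.length) :
    ((PySem.List.pyRange 0 (PySem.List.len chunk) 1).foldl
      (fun d j => d.insert
        (if j < (schema.length : Int) then PySem.List.pyGetD schema j "" else "f" ++ PySem.Int.toStr j)
        (PySem.List.pyGetD chunk j "")) PySem.Dict.empty)
    = PySem.Dict.ofList (schema.zip chunk) := by
  rw [PySem.List.len_eq, PySem.List.pyRange_one]
  simp only [sub_zero, Int.toNat_natCast, List.foldl_map, zero_add]
  have : ∀ (d : PySem.Dict String String),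
      (List.range chunk.length).foldl
        (fun d (k : Nat) => d.insert
          (if (k:Int) < (schema.length : Int) then PySem.List.pyGetD schema (k:Int) "" else "f" ++ PySem.Int.toStr (k:Int))
          (PySem.List.pyGetD chunk (k:Int) "")) d
      = (List.range chunk.length).foldl (fun d k => d.insert (schema.getD k "") (chunk.getD k "")) d := by
    intro d
    apply PySem.List.foldl_congr_mem
    intro acc k hk
    have hk' : k < chunk.length := List.mem_range.mp hk
    have hks : (k:Int) < (schema.length : Int) := by exact_mod_cast lt_of_lt_of_le hk' h
    simp [hks, PySem.List.pyGetD_natCast]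
  rw [this, pv_zipfold chunk schema _ h]
  rfl

-- a fold whose body ignores the element is the identity
theorem pv_foldl_id {α β : Type} (l : List α) (acc : β) :
    l.foldl (fun a _ => a) acc = acc := by
  induction l generalizing acc with
  | nil => rfl
  | cons x xs ih => simp only [List.foldl_cons]; exact ih acc

-- the main loop in Nat form: fold over record indices = structural chunking of the truncated list
theorem pv_main (schema : List String) (hpos : 0 < schema.length) :
    ∀ (n : Nat) (tokens : List String) (acc : List (List (String × String))),
    (List.range n).foldl
      (fun out k =>
        let chunk := (tokens.drop (k * schema.length)).take schema.length
        if chunk = [] then out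
        else
          out ++ [((PySem.List.pyRange 0 (PySem.List.len chunk) 1).foldl
            (fun d j => d.insert
              (if j < (schema.length : Int) then PySem.List.pyGetD schema j "" else "f" ++ PySem.Int.toStr j)
              (PySem.List.pyGetD chunk j "")) PySem.Dict.empty).items]) acc
    = acc ++ pvChunkB schema schema.length (tokens.take (n * schema.length)) := by
  obtain ⟨w', hw'⟩ : ∃ w', schema.length = w' + 1 := ⟨schema.length - 1, by omega⟩
  simp only [hw']
  intro n
  induction n with
  | zero => intro tokens acc; simp [pvChunkB]
  | succ n ih =>
    intro tokens acc
    rw [List.range_succ_eq_map, List.foldl_cons, List.foldl_map]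
    cases tokens with
    | nil =>
      simp only [List.drop_nil, List.take_nil, Nat.zero_mul, if_pos]
      simp [pvChunkB]
    | cons t ts =>
      have hch : ((t :: ts).drop (0 * (w' + 1))).take (w' + 1) = t :: ts.take w' := by
        simp
      rw [hch]
      simp only [reduceCtorEq, if_false, Nat.succ_eq_add_one]
      have hshift := PySem.List.foldl_congr_mem (List.range n)
        (fun out k =>
          if ((t :: ts).drop ((k + 1) * (w' + 1))).take (w' + 1) = [] then out
          else
            out ++ [((PySem.List.pyRange 0 (PySem.List.len (((t :: ts).drop ((k + 1) * (w' + 1))).take (w' + 1))) 1).foldl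
              (fun d j => d.insert
                (if j < ((w' + 1 : Nat) : Int) then PySem.List.pyGetD schema j "" else "f" ++ PySem.Int.toStr j)
                (PySem.List.pyGetD (((t :: ts).drop ((k + 1) * (w' + 1))).take (w' + 1)) j "")) PySem.Dict.empty).items])
        (fun out k =>
          if ((ts.drop w').drop (k * (w' + 1))).take (w' + 1) = [] then out
          else
            out ++ [((PySem.List.pyRange 0 (PySem.List.len (((ts.drop w').drop (k * (w' + 1))).take (w' + 1))) 1).foldl
              (fun d j => d.insert
                (if j < ((w' + 1 : Nat) : Int) then PySem.List.pyGetD schema j "" else "f" ++ PySem.Int.toStr j)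
                (PySem.List.pyGetD (((ts.drop w').drop (k * (w' + 1))).take (w' + 1)) j "")) PySem.Dict.empty).items])
        (acc ++ [((PySem.List.pyRange 0 (PySem.List.len (t :: ts.take w')) 1).foldl
              (fun d j => d.insert
                (if j < ((w' + 1 : Nat) : Int) then PySem.List.pyGetD schema j "" else "f" ++ PySem.Int.toStr j)
                (PySem.List.pyGetD (t :: ts.take w') j "")) PySem.Dict.empty).items])
        (by
        intro out k _
        have hd : ((t :: ts).drop ((k + 1) * (w' + 1))).take (w' + 1)
            = ((ts.drop w').drop (k * (w' + 1))).take (w' + 1) := by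
          have hmul : (k + 1) * (w' + 1) = k * (w' + 1) + (w' + 1) := by rw [add_one_mul]
          rw [List.drop_drop, show w' + k * (w' + 1) = (k + 1) * (w' + 1) - 1 by omega,
            show (t :: ts).drop ((k + 1) * (w' + 1)) = ts.drop ((k + 1) * (w' + 1) - 1) by
              rw [show (k + 1) * (w' + 1) = ((k + 1) * (w' + 1) - 1) + 1 by omega]; rfl]
        simp only [hd])
      rw [hshift, ih (ts.drop w') _]
      -- right-hand sides
      have hrec := pv_rec_eq schema (t :: ts.take w') (by simp only [List.length_cons, List.length_take, hw']; omega)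
      simp only [hw'] at hrec
      rw [hrec]
      have hmul : (n + 1) * (w' + 1) = n * (w' + 1) + (w' + 1) := by rw [add_one_mul]
      have htake : (t :: ts).take ((n + 1) * (w' + 1))
          = t :: ts.take ((n + 1) * (w' + 1) - 1) := by
        rw [show (n + 1) * (w' + 1) = ((n + 1) * (w' + 1) - 1) + 1 by omega]; rfl
      rw [htake]
      simp only [pvChunkB]
      have hhead : (t :: ts.take ((n + 1) * (w' + 1) - 1)).take (w' + 1)
          = t :: ts.take w' := by
        have h1 : w' + 1 ≤ (n + 1) * (w' + 1) := Nat.le_mul_of_pos_left _ (Nat.succ_pos n)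
        simp only [List.take_succ_cons, List.take_take]
        rw [show min w' ((n + 1) * (w' + 1) - 1) = w' from by omega]
      have htail : (ts.take ((n + 1) * (w' + 1) - 1)).drop w'
          = (ts.drop w').take (n * (w' + 1)) := by
        rw [List.drop_take]
        congr 1
        omega
      rw [hhead, htail]
      simp

-- the two ports agree on every input
theorem pv_final (raw : String) (schema : List String) :
    parse_pipe_frame_py raw schema = parse_pipe_frame_py_alt raw schema := by
  unfold parse_pipe_frame_py parse_pipe_frame_py_alt
  by_cases hlen : ((PySem.Str.splitMax? raw "|" 3).getD []).length < 4
  · simp only [if_pos hlen]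
  · simp only [if_neg hlen]
    set parts := (PySem.Str.splitMax? raw "|" 3).getD [] with hparts
    set count : Int := (PySem.Int.ofStr? (PySem.List.pyGetD parts 2 "")).getD 1 with hcount
    set tokens := (PySem.Str.split? (PySem.List.pyGetD parts 3 "") "^").getD [] with htok
    by_cases h0 : schema.length = 0 ∨ count ≤ 0
    · rw [if_pos h0]
      rcases h0 with h0 | h0
      · have hz : ∀ (i : Int), PySem.List.slice tokens (some (i * (schema.length : Int)))
            (some ((i + 1) * (schema.length : Int))) = [] := by
          intro i
          simp [h0, PySem.List.slice_to]
        simp only [hz, if_pos]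
        exact pv_foldl_id _ _
      · rw [PySem.List.pyRange_one_eq_nil (by omega)]
        rfl
    · rw [if_neg h0]
      rw [not_or, not_le] at h0
      obtain ⟨hw', hc⟩ := h0
      have hn : count = ((count.toNat : Nat) : Int) := (Int.toNat_of_nonneg (by omega)).symm
      rw [hn]
      have hN : ((count.toNat : Int) * (schema.length : Int)).toNat
          = count.toNat * schema.length := by
        exact Int.toNat_natCast _
      rw [pv_normalize schema tokens count.toNat [], pv_main schema (by omega) count.toNat tokens [], hN]
      rfl

-- ===== VERDICT (by name: the statement is the Claim_ definition above) =====
theorem parse_pipe_frame_py_spec : Claim_equal_parse_pipe_frame_py := by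
  intro raw field_schema _
  unfold Spec_parse_pipe_frame_py
  exact pv_final raw field_schema
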